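-- pv_equiv track=rewrite | github.com/LxShane/WMCS-1 | system_a_cognitive/meta/reflective_reasoner.py | _has_contradictions
-- ===== SOURCE A (Python) =====
-- from typing import Dict, List, Optional, Tuple
--
-- def _has_contradictions(context: Dict) -> bool:
--     """Check if context contains contradicting claims."""
--     facts = context.get("derived_facts", [])
--     # Simple check: look for negations of same subject
--     subjects = {}
--     for fact in facts:
--         if isinstance(fact, dict):
--             subj = fact.get("subject", "")
--             pred = fact.get("predicate", "")
--             key = f"{subj}_{pred}"
--             if key in subjects:
--                 return True  # Same subject+predicate seen twice
--             subjects[key] = True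
--     return False
-- ===== SOURCE B (Python) =====
-- def _has_contradictions(context) -> bool:
--     """Check if context contains contradicting claims."""
--     facts = context.get("derived_facts", [])
--     keys = sorted(f"{fact.get('subject', '')}_{fact.get('predicate', '')}"
--                   for fact in facts if isinstance(fact, dict))
--     return any(a == b for a, b in zip(keys, keys[1:]))
-- ===== Notes on version B (the rewrite author's own statement) =====
-- stated objective: alternative
-- what changed: Replaces the seen-dict loop with sort-then-scan: sorts the subject_predicate keys so duplicates become adjacent, then checks neighbouring pairs for equality; no hash structure or membership test at all.
import Mathlib
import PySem

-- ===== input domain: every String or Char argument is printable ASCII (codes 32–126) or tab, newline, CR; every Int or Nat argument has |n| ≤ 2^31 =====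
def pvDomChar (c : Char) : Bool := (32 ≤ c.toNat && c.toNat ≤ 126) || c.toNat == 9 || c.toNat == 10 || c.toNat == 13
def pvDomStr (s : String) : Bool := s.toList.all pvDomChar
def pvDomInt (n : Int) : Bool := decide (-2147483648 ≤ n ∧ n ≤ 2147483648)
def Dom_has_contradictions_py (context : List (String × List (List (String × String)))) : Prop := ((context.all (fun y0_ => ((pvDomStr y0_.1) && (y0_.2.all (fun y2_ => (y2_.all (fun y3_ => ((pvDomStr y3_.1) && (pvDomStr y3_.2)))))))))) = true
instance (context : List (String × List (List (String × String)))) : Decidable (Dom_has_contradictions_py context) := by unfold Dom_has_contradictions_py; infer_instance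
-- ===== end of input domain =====

-- B sorts the subject_predicate keys so duplicates become adjacent and scans
-- neighbouring pairs, instead of A's seen-dict loop with an early return.

-- ===== PORT A =====
-- f"{subj}_{pred}"
def pvKeyOf (fact : List (String × String)) : String :=
  (PySem.Dict.mk fact).getD "subject" "" ++ "_" ++ (PySem.Dict.mk fact).getD "predicate" ""

-- the 'for fact in facts' loop with its early 'return True'
def pvLoopA (facts : List (List (String × String))) (subjects : PySem.Dict String Bool) : Bool :=
  match facts with
  | [] => false
  | fact :: rest =>
    let key := pvKeyOf fact
    if subjects.contains key then true
    else pvLoopA rest (subjects.insert key true)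

def has_contradictions_py (context : List (String × List (List (String × String)))) : Bool :=
  let facts := (PySem.Dict.mk context).getD "derived_facts" []
  pvLoopA facts PySem.Dict.empty

-- ===== PORT B =====
-- any(a == b for a, b in zip(keys, keys[1:]))
def pvAdjDup : List String → Bool
  | a :: b :: t => if a == b then true else pvAdjDup (b :: t)
  | _ => false

def has_contradictions_py_alt (context : List (String × List (List (String × String)))) : Bool :=
  let facts := (PySem.Dict.mk context).getD "derived_facts" []
  let keys := PySem.List.sorted (facts.map pvKeyOf) (fun x => x) false
  pvAdjDup keys

-- ===== PRECONDITION & SPEC =====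
def Spec_has_contradictions_py (context : List (String × List (List (String × String)))) (out : Bool) : Prop := out = has_contradictions_py_alt context
instance (context : List (String × List (List (String × String)))) (out : Bool) : Decidable (Spec_has_contradictions_py context out) := by unfold Spec_has_contradictions_py; infer_instance

-- ===== CLAIM =====
def Claim_equal_has_contradictions_py : Prop := ∀ (context : List (String × List (List (String × String)))), Dom_has_contradictions_py context → Spec_has_contradictions_py context (has_contradictions_py context)

-- ===== LEMMAS AND PROOFS =====

-- A's loop returns true iff the key list has a duplicate or hits a key already seen.
lemma pvLoopA_iff (facts : List (List (String × String))) (d : PySem.Dict String Bool) :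
    pvLoopA facts d = true ↔
      ¬ (facts.map pvKeyOf).Nodup ∨ ∃ k ∈ facts.map pvKeyOf, d.contains k = true := by
  induction facts generalizing d with
  | nil => simp [pvLoopA]
  | cons fact rest ih =>
    by_cases h : d.contains (pvKeyOf fact) = true
    · have hl : pvLoopA (fact :: rest) d = true := by simp [pvLoopA, h]
      rw [hl, List.map_cons]
      exact iff_of_true rfl (Or.inr ⟨pvKeyOf fact, List.mem_cons_self, h⟩)
    · have hl : pvLoopA (fact :: rest) d = pvLoopA rest (d.insert (pvKeyOf fact) true) := by
        simp [pvLoopA, h]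
      rw [hl, ih, List.map_cons, List.nodup_cons]
      constructor
      · rintro (hnd | ⟨k, hk, hc⟩)
        · exact Or.inl (fun hh => hnd hh.2)
        · rw [PySem.Dict.contains_insert] at hc
          rcases Bool.or_eq_true_iff.mp hc with he | hd
          · exact Or.inl (fun hh => hh.1 (beq_iff_eq.mp he ▸ hk))
          · exact Or.inr ⟨k, List.mem_cons_of_mem _ hk, hd⟩
      · rintro (hnd | ⟨k, hk, hc⟩)
        · by_cases hmem : pvKeyOf fact ∈ rest.map pvKeyOf
          · exact Or.inr ⟨pvKeyOf fact, hmem, by rw [PySem.Dict.contains_insert]; simp⟩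
          · exact Or.inl (fun h2 => hnd ⟨hmem, h2⟩)
        · rcases List.mem_cons.mp hk with heq | hk'
          · exact absurd (heq ▸ hc) h
          · exact Or.inr ⟨k, hk', by rw [PySem.Dict.contains_insert]; simp [hc]⟩

-- on a (≤)-sorted list, an adjacent duplicate exists iff the list has a duplicate
lemma pvAdjDup_iff (l : List String) (hp : l.Pairwise (· ≤ ·)) :
    pvAdjDup l = true ↔ ¬ l.Nodup := by
  induction l with
  | nil => simp [pvAdjDup]
  | cons a t ih =>
    cases t with
    | nil => simp [pvAdjDup]
    | cons b u =>
      have htp : (b :: u).Pairwise (· ≤ ·) := hp.tail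
      by_cases hab : a = b
      · have : pvAdjDup (a :: b :: u) = true := by simp [pvAdjDup, hab]
        rw [this]
        exact iff_of_true rfl (by simp [List.nodup_cons, hab])
      · have hstep : pvAdjDup (a :: b :: u) = pvAdjDup (b :: u) := by
          simp [pvAdjDup, hab]
        have hnotmem : a ∉ b :: u := by
          intro hmem
          rcases List.mem_cons.mp hmem with h1 | h2
          · exact hab h1
          · have hab' : a ≤ b := (List.pairwise_cons.mp hp).1 b List.mem_cons_self
            have hbx : b ≤ a := (List.pairwise_cons.mp htp).1 a h2
            exact hab (le_antisymm hab' hbx)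
        rw [hstep, ih htp]
        simp [List.nodup_cons, hnotmem]

-- ===== VERDICT =====
theorem has_contradictions_py_spec : Claim_equal_has_contradictions_py := by
  intro context _
  unfold Spec_has_contradictions_py
  simp only [has_contradictions_py, has_contradictions_py_alt]
  set keys := ((PySem.Dict.mk context).getD "derived_facts" []).map pvKeyOf with hk
  have hperm : (PySem.List.sorted keys (fun x => x) false).Perm keys :=
    PySem.List.sorted_perm keys (fun x => x) false
  have hpair : (PySem.List.sorted keys (fun x => x) false).Pairwise (· ≤ ·) :=
    PySem.List.sorted_pairwise keys (fun x => x)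
  have hB : pvAdjDup (PySem.List.sorted keys (fun x => x) false) = true ↔ ¬ keys.Nodup := by
    rw [pvAdjDup_iff _ hpair, hperm.nodup_iff]
  have hA : pvLoopA ((PySem.Dict.mk context).getD "derived_facts" []) PySem.Dict.empty = true ↔
      ¬ keys.Nodup := by
    rw [pvLoopA_iff]
    constructor
    · rintro (h | ⟨k, _, hc⟩)
      · exact h
      · simp [PySem.Dict.contains_empty] at hc
    · exact Or.inl
  rw [Bool.eq_iff_iff, hA, hB]
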